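-- pv_equiv track=rewrite | github.com/voscom/mwos | src/version_git.py | GetGitShortHash
-- ===== SOURCE A (Python) =====
-- def GetGitShortHash(projGitVer):
--     ver=''
--     n=-1
--     for ch in projGitVer:
--         if n>0 :
--             ver += ch
--             n -= 1
--         else:
--             if ch=='#' :
--                 n=8
--     return ver
-- ===== SOURCE B (Python) =====
-- def GetGitShortHash(projGitVer):
--     parts = []
--     rest = projGitVer
--     while True:
--         idx = rest.find('#')
--         if idx < 0:
--             return ''.join(parts)
--         parts.append(rest[idx + 1:idx + 9])
--         rest = rest[idx + 9:]
-- ===== Notes on version B (the rewrite author's own statement) =====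
-- stated objective: faster
-- what changed: Replaces the per-character scan with a countdown counter by a find/slice loop: locate each marker with str.find, append the slice of the next up to 8 characters, and resume the search after the window.
import Mathlib
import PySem

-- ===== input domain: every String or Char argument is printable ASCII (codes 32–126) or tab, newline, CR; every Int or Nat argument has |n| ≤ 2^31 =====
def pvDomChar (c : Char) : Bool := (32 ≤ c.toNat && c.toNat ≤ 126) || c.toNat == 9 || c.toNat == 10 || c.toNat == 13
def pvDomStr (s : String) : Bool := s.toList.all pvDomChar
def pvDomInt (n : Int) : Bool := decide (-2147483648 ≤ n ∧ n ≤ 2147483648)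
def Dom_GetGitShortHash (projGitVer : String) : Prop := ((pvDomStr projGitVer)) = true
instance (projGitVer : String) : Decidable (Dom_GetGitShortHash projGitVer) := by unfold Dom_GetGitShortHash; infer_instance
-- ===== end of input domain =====

-- B replaces A's per-character countdown scan by a find/slice loop (same O(n), measurably faster in Python via C-level str.find and slicing).

-- ===== PORT A =====
-- the for-loop over projGitVer's characters with state (ver, n)
def GetGitShortHash (projGitVer : String) : String :=
  String.mk (projGitVer.toList.foldl
    (fun (st : List Char × Int) ch =>
      if st.2 > 0 then (st.1 ++ [ch], st.2 - 1)
      else if ch = '#' then (st.1, 8) else st)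
    ([], -1)).1

-- ===== PORT B =====
-- the while-loop of Source B: idx = rest.find('#'); if idx < 0 return ''.join(parts);
-- parts.append(rest[idx+1:idx+9]); rest = rest[idx+9:]
def GetGitShortHashAltGo (parts : List (List Char)) (rest : List Char) : List Char :=
  let idx := PySem.Chars.find rest ['#']
  if h : idx < 0 then parts.flatten
  else
    GetGitShortHashAltGo (parts ++ [PySem.List.slice rest (some (idx + 1)) (some (idx + 9))])
      (PySem.List.slice rest (some (idx + 9)) none)
termination_by rest.length
decreasing_by
  have h0 : (0 : Int) ≤ idx := by omega
  have hin : ['#'] <:+: rest := (PySem.Chars.find_nonneg_iff rest ['#']).mp h0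
  have hne : rest ≠ [] := by
    rintro rfl
    rcases hin with ⟨a, b, hab⟩
    simp_all [List.append_eq_nil_iff]
  rw [PySem.List.slice_from rest (show (0:Int) ≤ idx + 9 by omega)]
  have h1 : 1 ≤ (idx + 9).toNat := by omega
  have h2 := List.length_pos_iff.mpr hne
  simp only [List.length_drop]
  omega

def GetGitShortHash_alt (projGitVer : String) : String :=
  String.mk (GetGitShortHashAltGo [] projGitVer.toList)

-- ===== PRECONDITION & SPEC =====
def Spec_GetGitShortHash (projGitVer : String) (out : String) : Prop := out = GetGitShortHash_alt projGitVer
instance (projGitVer : String) (out : String) : Decidable (Spec_GetGitShortHash projGitVer out) := by unfold Spec_GetGitShortHash; infer_instance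

-- ===== CLAIM (what is proved, stated in full; the proofs are below) =====
def Claim_equal_GetGitShortHash : Prop := ∀ (projGitVer : String), Dom_GetGitShortHash projGitVer → Spec_GetGitShortHash projGitVer (GetGitShortHash projGitVer)

-- ===== LEMMAS AND PROOFS =====

-- reference function: the chars following each '#', windows of 8, '#' inside a window absorbed
def hashWindows : List Char → List Char
  | [] => []
  | c :: cs => if c = '#' then cs.take 8 ++ hashWindows (cs.drop 8) else hashWindows cs
termination_by cs => cs.length
decreasing_by
  all_goals simp only [List.length_drop, List.length_cons]
  all_goals omega

theorem hashWindows_nil : hashWindows [] = [] := by simp [hashWindows]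

theorem hashWindows_cons (c : Char) (cs : List Char) :
    hashWindows (c :: cs) =
      if c = '#' then cs.take 8 ++ hashWindows (cs.drop 8) else hashWindows cs := by
  rw [hashWindows]

theorem hashWindows_no_hash (cs : List Char) (h : '#' ∉ cs) : hashWindows cs = [] := by
  induction cs with
  | nil => simp [hashWindows]
  | cons c cs ih =>
    rw [hashWindows_cons]
    have hc : c ≠ '#' := by intro hc; exact h (by simp [hc])
    simp [hc, ih (by intro hm; exact h (by simp [hm]))]

theorem hashWindows_append_no_hash (pre l : List Char) (h : '#' ∉ pre) :
    hashWindows (pre ++ l) = hashWindows l := by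
  induction pre with
  | nil => simp
  | cons c cs ih =>
    have hc : c ≠ '#' := by intro hc; exact h (by simp [hc])
    rw [List.cons_append, hashWindows_cons]
    simp [hc, ih (by intro hm; exact h (by simp [hm]))]

-- A's loop invariant
theorem foldA_eq (cs : List Char) : ∀ (acc : List Char) (n : Int),
    (cs.foldl (fun (st : List Char × Int) ch =>
        if st.2 > 0 then (st.1 ++ [ch], st.2 - 1)
        else if ch = '#' then (st.1, 8) else st) (acc, n)).1 =
      acc ++ (if 0 < n then cs.take n.toNat ++ hashWindows (cs.drop n.toNat) else hashWindows cs) := by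
  induction cs with
  | nil =>
    intro acc n
    split_ifs with h
    · have : n.toNat ≠ 0 := by omega
      simp [hashWindows_nil]
    · simp [hashWindows_nil]
  | cons c cs ih =>
    intro acc n
    by_cases h : 0 < n
    · have h1 : (n : Int) > 0 := h
      simp only [List.foldl_cons, if_pos h1]
      rw [ih]
      have hnt : n.toNat = (n - 1).toNat + 1 := by omega
      have hl : (if 0 < n - 1 then cs.take (n-1).toNat ++ hashWindows (cs.drop (n-1).toNat)
            else hashWindows cs)
          = cs.take (n-1).toNat ++ hashWindows (cs.drop (n-1).toNat) := by
        by_cases h2 : 0 < n - 1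
        · rw [if_pos h2]
        · have hz : (n - 1).toNat = 0 := by omega
          rw [if_neg h2, hz]
          simp
      rw [hl, hnt]
      simp [List.take_succ_cons, List.drop_succ_cons]
    · have h1 : ¬ ((n : Int) > 0) := h
      simp only [List.foldl_cons, if_neg h1]
      by_cases hc : c = '#'
      · simp only [if_pos hc, ih]
        rw [hashWindows_cons, if_pos hc]
        simp
      · simp only [if_neg hc, ih, if_neg h]
        rw [hashWindows_cons, if_neg hc]

-- ['#'] is a prefix of l iff l starts with '#'
theorem singleton_prefix_iff (l : List Char) : ['#'] <+: l ↔ ∃ t, l = '#' :: t := by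
  constructor
  · rintro ⟨t, rfl⟩; exact ⟨t, rfl⟩
  · rintro ⟨t, rfl⟩; exact ⟨t, rfl⟩

-- B's loop on a rest with no '#': returns the parts already collected
theorem goB_nohash (parts : List (List Char)) (rest : List Char)
    (h : PySem.Chars.find rest ['#'] < 0) :
    GetGitShortHashAltGo parts rest = parts.flatten ++ hashWindows rest := by
  rw [GetGitShortHashAltGo]
  simp only [dif_pos h]
  have hno : ¬ ['#'] <:+: rest := by
    rw [← PySem.Chars.find_eq_neg_one_iff]
    have := PySem.Chars.neg_one_le_find rest ['#']
    omega
  have hmem : '#' ∉ rest := by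
    intro hm
    obtain ⟨s, t, rfl⟩ := List.append_of_mem hm
    exact hno ⟨s, t, by simp⟩
  rw [hashWindows_no_hash rest hmem, List.append_nil]

-- B's loop computes the flattened parts followed by the windows of the rest
theorem goB_eq_aux (n : Nat) : ∀ (rest : List Char), rest.length ≤ n → ∀ (parts : List (List Char)),
    GetGitShortHashAltGo parts rest = parts.flatten ++ hashWindows rest := by
  induction n with
  | zero =>
    intro rest hlen parts
    have hr : rest = [] := by
      cases rest with
      | nil => rfl
      | cons c cs => simp at hlen
    subst hr
    exact goB_nohash parts [] (by decide)
  | succ n IH =>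
    intro rest hlen parts
    by_cases h : PySem.Chars.find rest ['#'] < 0
    · exact goB_nohash parts rest h
    · rw [GetGitShortHashAltGo]
      simp only [dif_neg h]
      have h0 : (0 : Int) ≤ PySem.Chars.find rest ['#'] := by omega
      obtain ⟨hpre, hfirst⟩ := PySem.Chars.find_spec h0
      set idx := PySem.Chars.find rest ['#'] with hidx
      obtain ⟨t, ht⟩ := (singleton_prefix_iff _).mp hpre
      set k := idx.toNat with hk
      have hrest : rest = rest.take k ++ '#' :: t := by
        conv_lhs => rw [← List.take_append_drop k rest, ht]
      have hnohash : '#' ∉ rest.take k := by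
        intro hm
        obtain ⟨i, hi, hgi⟩ := List.getElem_of_mem hm
        have hik : i < k := by
          have := rest.length_take_le k
          omega
        have hilen : i < rest.length := by
          have hkl : idx ≤ rest.length := PySem.Chars.find_le_length rest ['#']
          omega
        apply hfirst i hik
        rw [singleton_prefix_iff]
        refine ⟨rest.drop (i + 1), ?_⟩
        have hgE : rest[i] = '#' := by
          rw [← hgi]; simp [List.getElem_take]
        rw [← hgE, ← List.getElem_cons_drop]
      have hslice1 : PySem.List.slice rest (some (idx + 1)) (some (idx + 9)) = t.take 8 := by
        have e1 : idx + 1 = ((k + 1 : Nat) : Int) := by push_cast; omega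
        have e9 : idx + 9 = ((k + 1 : Nat) : Int) + ((8 : Nat) : Int) := by push_cast; omega
        rw [e1, e9, PySem.List.slice_natCast_add]
        rw [← List.drop_drop, ht]
        simp
      have hslice2 : PySem.List.slice rest (some (idx + 9)) none = t.drop 8 := by
        have e9 : idx + 9 = ((k + 9 : Nat) : Int) := by push_cast; omega
        rw [e9, PySem.List.slice_from_natCast]
        have h9 : k + 9 = (k + 1) + 8 := by omega
        rw [h9, ← List.drop_drop, ← List.drop_drop, ht]
        simp
      rw [hslice1, hslice2]
      have hlt : (t.drop 8).length ≤ n := by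
        have h1 : (t.drop 8).length ≤ t.length := by simp
        have hlr : rest.length = (rest.take k).length + (t.length + 1) := by
          conv_lhs => rw [hrest]
          simp
        omega
      rw [IH (t.drop 8) hlt]
      have hw : hashWindows rest = t.take 8 ++ hashWindows (t.drop 8) := by
        rw [hrest, hashWindows_append_no_hash _ _ hnohash, hashWindows_cons, if_pos rfl]
      rw [hw]
      simp

theorem goB_eq (parts : List (List Char)) (rest : List Char) :
    GetGitShortHashAltGo parts rest = parts.flatten ++ hashWindows rest :=
  goB_eq_aux rest.length rest le_rfl parts

-- ===== VERDICT (by name: the statement is the Claim_ definition above) =====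
theorem GetGitShortHash_spec : Claim_equal_GetGitShortHash := by
  intro s _
  unfold Spec_GetGitShortHash GetGitShortHash GetGitShortHash_alt
  rw [foldA_eq, goB_eq]
  norm_num
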